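-- pv_equiv track=rewrite | github.com/ZhengxuYan/NoveltyRank | embedding/similiarity_report/generate_similarity_reports.py | _pick_secondary_split
-- ===== SOURCE A (Python) =====
-- from typing import Any, Callable, Dict, Iterable, List, Optional, Tuple
--
-- def _pick_secondary_split(split_dirs: List[Tuple[str, str]], primary_name: str) -> Optional[str]:
--     for name, path in split_dirs:
--         if name == "test" and name != primary_name:
--             return path
--     for name, path in split_dirs:
--         if name != primary_name:
--             return path
--     return None
-- ===== SOURCE B (Python) =====
-- from typing import List, Optional, Tuple
--
-- def _pick_secondary_split(split_dirs: List[Tuple[str, str]], primary_name: str) -> Optional[str]: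
--     fallback = None
--     for name, path in split_dirs:
--         if name == "test" and name != primary_name:
--             return path
--         if name != primary_name and fallback is None:
--             fallback = path
--     return fallback
-- ===== Notes on version B (the rewrite author's own statement) =====
-- stated objective: simpler
-- what changed: Replaces A's two sequential scans over split_dirs by a single pass that returns immediately on a non-primary 'test' entry and remembers the first non-primary path as a fallback returned after the loop.
import Mathlib
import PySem

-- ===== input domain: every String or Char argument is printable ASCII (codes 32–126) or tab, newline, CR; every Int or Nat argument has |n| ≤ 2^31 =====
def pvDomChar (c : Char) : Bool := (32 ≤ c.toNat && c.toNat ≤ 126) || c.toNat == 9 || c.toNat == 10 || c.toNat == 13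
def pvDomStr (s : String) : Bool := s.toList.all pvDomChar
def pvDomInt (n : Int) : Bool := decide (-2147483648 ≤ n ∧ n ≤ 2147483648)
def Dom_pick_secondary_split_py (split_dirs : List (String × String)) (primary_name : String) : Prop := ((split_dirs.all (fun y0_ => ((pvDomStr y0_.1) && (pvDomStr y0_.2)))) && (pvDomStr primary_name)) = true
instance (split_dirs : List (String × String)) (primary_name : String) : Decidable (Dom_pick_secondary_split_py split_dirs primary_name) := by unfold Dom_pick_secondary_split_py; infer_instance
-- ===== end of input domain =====

-- B: one pass with a remembered fallback instead of A's two sequential scans over split_dirs (simpler).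
-- ===== PORT A =====
-- first loop of A: return path of the first entry named "test" whose name differs from primary_name
def pvScanTest (split_dirs : List (String × String)) (primary_name : String) : Option String :=
  match split_dirs with
  | [] => none
  | (name, path) :: rest =>
    if name = "test" ∧ name ≠ primary_name then some path
    else pvScanTest rest primary_name

-- second loop of A: return path of the first entry whose name differs from primary_name
def pvScanOther (split_dirs : List (String × String)) (primary_name : String) : Option String :=
  match split_dirs with
  | [] => none
  | (name, path) :: rest =>
    if name ≠ primary_name then some path
    else pvScanOther rest primary_name

def pick_secondary_split_py (split_dirs : List (String × String)) (primary_name : String) : Option String :=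
  match pvScanTest split_dirs primary_name with
  | some p => some p
  | none =>
    match pvScanOther split_dirs primary_name with
    | some p => some p
    | none => none

-- ===== PORT B =====
-- B's loop: early return on a non-primary "test" entry; otherwise remember the first non-primary path
def pvLoopB (split_dirs : List (String × String)) (primary_name : String) (fallback : Option String) : Option String :=
  match split_dirs with
  | [] => fallback
  | (name, path) :: rest =>
    if name = "test" ∧ name ≠ primary_name then some path
    else pvLoopB rest primary_name
      (if name ≠ primary_name ∧ fallback = none then some path else fallback)

def pick_secondary_split_py_alt (split_dirs : List (String × String)) (primary_name : String) : Option String :=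
  pvLoopB split_dirs primary_name none

-- ===== PRECONDITION & SPEC =====
def Spec_pick_secondary_split_py (split_dirs : List (String × String)) (primary_name : String) (out : Option String) : Prop := out = pick_secondary_split_py_alt split_dirs primary_name
instance (split_dirs : List (String × String)) (primary_name : String) (out : Option String) : Decidable (Spec_pick_secondary_split_py split_dirs primary_name out) := by unfold Spec_pick_secondary_split_py; infer_instance

-- ===== CLAIM (what is proved, stated in full; the proofs are below) =====
def Claim_equal_pick_secondary_split_py : Prop := ∀ (split_dirs : List (String × String)) (primary_name : String), Dom_pick_secondary_split_py split_dirs primary_name → Spec_pick_secondary_split_py split_dirs primary_name (pick_secondary_split_py split_dirs primary_name)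

-- ===== LEMMAS AND PROOFS =====

-- ===== VERDICT (by name: the statement is the Claim_ definition above) =====
-- invariant of B's loop: it returns the first non-primary "test" path if any, else the
-- fallback if set, else the first non-primary path
theorem pvLoopB_eq (split_dirs : List (String × String)) (primary_name : String)
    (fb : Option String) :
    pvLoopB split_dirs primary_name fb =
      match pvScanTest split_dirs primary_name with
      | some p => some p
      | none =>
        match fb with
        | some f => some f
        | none => pvScanOther split_dirs primary_name := by
  induction split_dirs generalizing fb with
  | nil => cases fb <;> simp [pvLoopB, pvScanTest, pvScanOther]
  | cons hd tl ih =>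
    obtain ⟨name, path⟩ := hd
    by_cases h1 : name = "test" ∧ name ≠ primary_name
    · simp only [pvLoopB, pvScanTest, if_pos h1]
    · by_cases h2 : name = primary_name
      · have hne : ¬ name ≠ primary_name := not_not_intro h2
        have h3 : ¬ (name ≠ primary_name ∧ fb = none) := fun h => hne h.1
        simp only [pvLoopB, pvScanTest, pvScanOther, if_neg h1, if_neg h3, if_neg hne, ih]
      · cases fb <;>
          simp only [pvLoopB, pvScanTest, pvScanOther, if_neg h1, ih] <;>
          simp [h2]
theorem pick_secondary_split_py_spec : Claim_equal_pick_secondary_split_py := by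
  intro split_dirs primary_name _
  unfold Spec_pick_secondary_split_py pick_secondary_split_py pick_secondary_split_py_alt
  rw [pvLoopB_eq]
  cases pvScanTest split_dirs primary_name <;>
    cases h : pvScanOther split_dirs primary_name <;> simp
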